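-- pv_equiv track=rewrite | github.com/daringanitch/Enterprise-OSINT-Platform | simple-backend/advanced_analysis.py | _assess_kill_chain
-- ===== SOURCE A (Python) =====
-- from typing import Dict, List, Optional, Any, Tuple
--
-- def _assess_kill_chain(tactics: Dict) -> str:
--     """Assess kill chain coverage"""
--     early_stage = ['reconnaissance', 'resource_development', 'initial_access']
--     mid_stage = ['execution', 'persistence', 'privilege_escalation', 'defense_evasion']
--     late_stage = ['credential_access', 'discovery', 'lateral_movement', 'collection']
--     impact_stage = ['command_and_control', 'exfiltration', 'impact']
--
--     stages = []
--     if any(t in tactics for t in early_stage):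
--         stages.append('early')
--     if any(t in tactics for t in mid_stage):
--         stages.append('mid')
--     if any(t in tactics for t in late_stage):
--         stages.append('late')
--     if any(t in tactics for t in impact_stage):
--         stages.append('impact')
--
--     if len(stages) >= 3:
--         return "Full kill chain coverage - active threat likely"
--     elif len(stages) == 2:
--         return "Partial kill chain coverage - potential threat developing"
--     elif len(stages) == 1:
--         return f"Limited to {stages[0]} stage activities"
--     return "Minimal kill chain indicators"
-- ===== SOURCE B (Python) =====
-- _GROUPS = {
--     'early': ['reconnaissance', 'resource_development', 'initial_access'],
--     'mid': ['execution', 'persistence', 'privilege_escalation', 'defense_evasion'],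
--     'late': ['credential_access', 'discovery', 'lateral_movement', 'collection'],
--     'impact': ['command_and_control', 'exfiltration', 'impact'],
-- }
-- _STAGE_OF = {t: stage for stage, group in _GROUPS.items() for t in group}
--
-- def _assess_kill_chain(tactics):
--     """Assess kill chain coverage"""
--     covered = set()
--     for t in tactics:
--         stage = _STAGE_OF.get(t)
--         if stage is not None:
--             covered.add(stage)
--     n = len(covered)
--     if n >= 3:
--         return "Full kill chain coverage - active threat likely"
--     if n == 2:
--         return "Partial kill chain coverage - potential threat developing"
--     if n == 1:
--         (only,) = covered
--         return f"Limited to {only} stage activities"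
--     return "Minimal kill chain indicators"
-- ===== Notes on version B (the rewrite author's own statement) =====
-- stated objective: alternative
-- what changed: Replaces the four any-scans over the constant stage groups (membership tests into the input dict) by a single pass over the input keys through a precomputed tactic-to-stage reverse index accumulating a set of covered stages.
import Mathlib
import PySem

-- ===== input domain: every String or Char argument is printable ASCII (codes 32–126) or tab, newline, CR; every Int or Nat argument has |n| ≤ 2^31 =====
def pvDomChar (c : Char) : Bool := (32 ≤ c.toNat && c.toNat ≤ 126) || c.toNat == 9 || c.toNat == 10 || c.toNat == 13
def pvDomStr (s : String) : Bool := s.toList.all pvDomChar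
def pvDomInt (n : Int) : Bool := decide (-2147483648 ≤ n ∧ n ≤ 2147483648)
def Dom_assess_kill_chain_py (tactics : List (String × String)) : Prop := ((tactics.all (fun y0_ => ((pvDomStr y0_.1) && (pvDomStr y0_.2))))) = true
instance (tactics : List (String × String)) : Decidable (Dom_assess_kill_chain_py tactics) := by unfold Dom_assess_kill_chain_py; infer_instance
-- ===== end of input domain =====

-- B replaces A's four any-scans over the constant stage groups by a single pass over the
-- input keys through a precomputed tactic→stage index feeding a set of covered stages
-- (objective: alternative decomposition; same observable behaviour).

-- ===== PORT A =====
def assess_kill_chain_py (tactics : List (String × String)) : String :=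
  let early := ["reconnaissance", "resource_development", "initial_access"]
  let mid := ["execution", "persistence", "privilege_escalation", "defense_evasion"]
  let late := ["credential_access", "discovery", "lateral_movement", "collection"]
  let impact := ["command_and_control", "exfiltration", "impact"]
  let stages : List String := []
  let stages := if early.any (fun t => tactics.any (fun p => p.1 == t)) then stages ++ ["early"] else stages
  let stages := if mid.any (fun t => tactics.any (fun p => p.1 == t)) then stages ++ ["mid"] else stages
  let stages := if late.any (fun t => tactics.any (fun p => p.1 == t)) then stages ++ ["late"] else stages
  let stages := if impact.any (fun t => tactics.any (fun p => p.1 == t)) then stages ++ ["impact"] else stages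
  if stages.length ≥ 3 then "Full kill chain coverage - active threat likely"
  else if stages.length = 2 then "Partial kill chain coverage - potential threat developing"
  else if stages.length = 1 then "Limited to " ++ PySem.List.pyGetD stages 0 "" ++ " stage activities"
  else "Minimal kill chain indicators"

-- ===== PORT B =====
-- the precomputed reverse index _STAGE_OF of Source B
def pvStageMap : PySem.Dict String String := PySem.Dict.ofList
  [("reconnaissance", "early"), ("resource_development", "early"), ("initial_access", "early"),
   ("execution", "mid"), ("persistence", "mid"), ("privilege_escalation", "mid"), ("defense_evasion", "mid"),
   ("credential_access", "late"), ("discovery", "late"), ("lateral_movement", "late"), ("collection", "late"),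
   ("command_and_control", "impact"), ("exfiltration", "impact"), ("impact", "impact")]

-- the loop of Source B accumulating the set `covered`
def pvCovered (tactics : List (String × String)) : PySem.Set String :=
  tactics.foldl (fun s p =>
    match pvStageMap.get? p.1 with
    | some st => PySem.Set.add s st
    | none => s) PySem.Set.empty

def assess_kill_chain_py_alt (tactics : List (String × String)) : String :=
  let covered := pvCovered tactics
  let n := PySem.Set.len covered
  if n ≥ 3 then "Full kill chain coverage - active threat likely"
  else if n = 2 then "Partial kill chain coverage - potential threat developing"
  else if n = 1 then "Limited to " ++ covered.headD "" ++ " stage activities"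
  else "Minimal kill chain indicators"

-- ===== PRECONDITION & SPEC =====
def Spec_assess_kill_chain_py (tactics : List (String × String)) (out : String) : Prop := out = assess_kill_chain_py_alt tactics
instance (tactics : List (String × String)) (out : String) : Decidable (Spec_assess_kill_chain_py tactics out) := by unfold Spec_assess_kill_chain_py; infer_instance

-- ===== CLAIM (what is proved, stated in full; the proofs are below) =====
def Claim_equal_assess_kill_chain_py : Prop := ∀ (tactics : List (String × String)), Dom_assess_kill_chain_py tactics → Spec_assess_kill_chain_py tactics (assess_kill_chain_py tactics)

-- ===== LEMMAS AND PROOFS =====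

-- the reverse index, characterised pointwise
lemma pvStageMap_get (s x : String) : pvStageMap.get? s = some x ↔
    (x = "early" ∧ s ∈ ["reconnaissance", "resource_development", "initial_access"]) ∨
    (x = "mid" ∧ s ∈ ["execution", "persistence", "privilege_escalation", "defense_evasion"]) ∨
    (x = "late" ∧ s ∈ ["credential_access", "discovery", "lateral_movement", "collection"]) ∨
    (x = "impact" ∧ s ∈ ["command_and_control", "exfiltration", "impact"]) := by
  rw [show pvStageMap = PySem.Dict.mk
    [("reconnaissance", "early"), ("resource_development", "early"), ("initial_access", "early"),
     ("execution", "mid"), ("persistence", "mid"), ("privilege_escalation", "mid"), ("defense_evasion", "mid"),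
     ("credential_access", "late"), ("discovery", "late"), ("lateral_movement", "late"), ("collection", "late"),
     ("command_and_control", "impact"), ("exfiltration", "impact"), ("impact", "impact")] from rfl]
  simp only [PySem.Dict.get?_mk_cons]
  rcases eq_or_ne s "reconnaissance" with rfl | h1
  · simp [eq_comm]
  rcases eq_or_ne s "resource_development" with rfl | h2
  · simp [eq_comm]
  rcases eq_or_ne s "initial_access" with rfl | h3
  · simp [eq_comm]
  rcases eq_or_ne s "execution" with rfl | h4
  · simp [eq_comm]
  rcases eq_or_ne s "persistence" with rfl | h5
  · simp [eq_comm]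
  rcases eq_or_ne s "privilege_escalation" with rfl | h6
  · simp [eq_comm]
  rcases eq_or_ne s "defense_evasion" with rfl | h7
  · simp [eq_comm]
  rcases eq_or_ne s "credential_access" with rfl | h8
  · simp [eq_comm]
  rcases eq_or_ne s "discovery" with rfl | h9
  · simp [eq_comm]
  rcases eq_or_ne s "lateral_movement" with rfl | h10
  · simp [eq_comm]
  rcases eq_or_ne s "collection" with rfl | h11
  · simp [eq_comm]
  rcases eq_or_ne s "command_and_control" with rfl | h12
  · simp [eq_comm]
  rcases eq_or_ne s "exfiltration" with rfl | h13
  · simp [eq_comm]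
  rcases eq_or_ne s "impact" with rfl | h14
  · simp [eq_comm]
  simp [PySem.Dict.get?, h1, h2, h3, h4, h5, h6, h7, h8, h9, h10, h11, h12, h13, h14, Ne.symm h1, Ne.symm h2, Ne.symm h3, Ne.symm h4, Ne.symm h5, Ne.symm h6, Ne.symm h7, Ne.symm h8, Ne.symm h9, Ne.symm h10, Ne.symm h11, Ne.symm h12, Ne.symm h13, Ne.symm h14]

lemma pvCovered_mem_aux (l : List (String × String)) (acc : List String) (x : String) :
    x ∈ l.foldl (fun s p =>
      match pvStageMap.get? p.1 with
      | some st => PySem.Set.add s st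
      | none => s) acc ↔ x ∈ acc ∨ ∃ p ∈ l, pvStageMap.get? p.1 = some x := by
  induction l generalizing acc with
  | nil => simp
  | cons p l ih =>
    cases h : pvStageMap.get? p.1 with
    | none => simp [List.foldl_cons, h, ih]
    | some st =>
      simp [List.foldl_cons, h, ih, PySem.Set.mem_add]
      tauto

lemma pvCovered_nodup_aux (l : List (String × String)) (acc : List String) (h : acc.Nodup) :
    (l.foldl (fun s p =>
      match pvStageMap.get? p.1 with
      | some st => PySem.Set.add s st
      | none => s) acc).Nodup := by
  induction l generalizing acc with
  | nil => simpa
  | cons p l ih =>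
    cases hg : pvStageMap.get? p.1 with
    | none => simpa [List.foldl_cons, hg] using ih acc h
    | some st => simpa [List.foldl_cons, hg] using ih _ (PySem.Set.nodup_add _ _ h)

lemma pvCovered_mem (tactics : List (String × String)) (x : String) :
    x ∈ pvCovered tactics ↔ ∃ p ∈ tactics, pvStageMap.get? p.1 = some x := by
  simpa [pvCovered, PySem.Set.empty] using pvCovered_mem_aux tactics [] x

lemma pvCovered_nodup (tactics : List (String × String)) : (pvCovered tactics).Nodup :=
  pvCovered_nodup_aux tactics [] List.nodup_nil

-- the covered set is, up to order, the stage labels that some input key reaches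
lemma pvCovered_perm (tactics : List (String × String)) :
    (pvCovered tactics).Perm
      (["early", "mid", "late", "impact"].filter
        (fun x => decide (∃ p ∈ tactics, pvStageMap.get? p.1 = some x))) := by
  rw [List.perm_ext_iff_of_nodup (pvCovered_nodup tactics) (List.Nodup.filter _ (by decide))]
  intro x
  rw [List.mem_filter, pvCovered_mem]
  constructor
  · intro hx
    refine ⟨?_, decide_eq_true hx⟩
    obtain ⟨p, _, hp⟩ := hx
    rcases (pvStageMap_get p.1 x).mp hp with ⟨rfl, _⟩ | ⟨rfl, _⟩ | ⟨rfl, _⟩ | ⟨rfl, _⟩ <;> simp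
  · rintro ⟨_, hx⟩; exact of_decide_eq_true hx

lemma pvCondE (tactics : List (String × String)) :
    ((["reconnaissance", "resource_development", "initial_access"] : List String).any
      (fun t => tactics.any (fun p => p.1 == t)) = true) ↔
    ∃ p ∈ tactics, pvStageMap.get? p.1 = some "early" := by
  simp [List.any_eq_true, beq_iff_eq, pvStageMap_get]
  aesop

lemma pvCondM (tactics : List (String × String)) :
    ((["execution", "persistence", "privilege_escalation", "defense_evasion"] : List String).any
      (fun t => tactics.any (fun p => p.1 == t)) = true) ↔
    ∃ p ∈ tactics, pvStageMap.get? p.1 = some "mid" := by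
  simp [List.any_eq_true, beq_iff_eq, pvStageMap_get]
  aesop

lemma pvCondL (tactics : List (String × String)) :
    ((["credential_access", "discovery", "lateral_movement", "collection"] : List String).any
      (fun t => tactics.any (fun p => p.1 == t)) = true) ↔
    ∃ p ∈ tactics, pvStageMap.get? p.1 = some "late" := by
  simp [List.any_eq_true, beq_iff_eq, pvStageMap_get]
  aesop

lemma pvCondI (tactics : List (String × String)) :
    ((["command_and_control", "exfiltration", "impact"] : List String).any
      (fun t => tactics.any (fun p => p.1 == t)) = true) ↔
    ∃ p ∈ tactics, pvStageMap.get? p.1 = some "impact" := by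
  simp [List.any_eq_true, beq_iff_eq, pvStageMap_get]
  aesop

-- ===== VERDICT (by name: the statement is the Claim_ definition above) =====
set_option maxHeartbeats 2000000 in
theorem assess_kill_chain_py_spec : Claim_equal_assess_kill_chain_py := by
  intro tactics _
  unfold Spec_assess_kill_chain_py
  have c1 := pvCondE tactics
  have c2 := pvCondM tactics
  have c3 := pvCondL tactics
  have c4 := pvCondI tactics
  have hperm := pvCovered_perm tactics
  by_cases hE : ∃ p ∈ tactics, pvStageMap.get? p.1 = some "early" <;>
    by_cases hM : ∃ p ∈ tactics, pvStageMap.get? p.1 = some "mid" <;>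
      by_cases hL : ∃ p ∈ tactics, pvStageMap.get? p.1 = some "late" <;>
        by_cases hI : ∃ p ∈ tactics, pvStageMap.get? p.1 = some "impact" <;>
  · simp only [hE, hM, hL, hI] at c1 c2 c3 c4
    simp only [List.filter_cons, List.filter_nil, decide_eq_true_eq, hE, hM, hL, hI,
      if_true, if_false] at hperm
    have hlen := hperm.length_eq
    simp only [List.length_cons, List.length_nil] at hlen
    simp only [assess_kill_chain_py, assess_kill_chain_py_alt, c1, c2, c3, c4,
      if_true, if_false, PySem.Set.len]
    first
      | (rw [List.perm_singleton.mp hperm]; rfl)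
      | (rw [hlen]; rfl)
      | simp [hlen]
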